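-- pv_equiv track=rewrite | github.com/loopiepoopie/ProjectEuler | Problems/#66.py | compute_frac
-- ===== SOURCE A (Python) =====
-- import math
--
-- def compute_frac(vec):
--     a = 1
--     b = vec[len(vec) - 1]
--
--     for i in range(len(vec) - 2, -1, -1):
--         sus = vec[i] * b + a
--         jos = b
--         gcd = math.gcd(sus, jos)
--         sus //= gcd
--         jos //= gcd
--         a = jos
--         b = sus
--     return [b, a]
-- ===== SOURCE B (Python) =====
-- def compute_frac(vec):
--     h_prev, h = 1, vec[0]
--     k_prev, k = 0, 1
--     for x in vec[1:]:
--         h_prev, h = h, x * h + h_prev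
--         k_prev, k = k, x * k + k_prev
--     return [h, k]
-- ===== Notes on version B (the rewrite author's own statement) =====
-- stated objective: faster
-- what changed: Replaces A's back-to-front fraction build with a per-iteration math.gcd reduction (which is provably always a no-op, the pair stays coprime) by the forward fundamental recurrence for continued-fraction convergents, maintaining two successive (numerator, denominator) pairs and performing no gcd at all.
import Mathlib
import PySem

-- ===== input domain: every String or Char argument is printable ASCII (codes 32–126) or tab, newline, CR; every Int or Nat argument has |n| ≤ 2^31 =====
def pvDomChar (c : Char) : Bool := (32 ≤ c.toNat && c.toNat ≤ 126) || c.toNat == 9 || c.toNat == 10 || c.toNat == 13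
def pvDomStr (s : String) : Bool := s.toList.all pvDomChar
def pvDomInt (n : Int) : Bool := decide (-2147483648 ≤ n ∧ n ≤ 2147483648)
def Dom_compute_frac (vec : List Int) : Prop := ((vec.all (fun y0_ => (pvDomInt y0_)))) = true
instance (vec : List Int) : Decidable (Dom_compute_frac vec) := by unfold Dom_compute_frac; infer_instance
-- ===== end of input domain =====

-- B replaces A's backward loop with per-step gcd reduction (the gcd is provably always 1)
-- by the forward convergent recurrence with no gcd at all; equivalence is about the return value only.

-- ===== PORT A =====
-- one loop iteration of A: sus/jos, math.gcd (= Int.gcd, nonneg), the two exact floor divisions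
def computeFracStep (vec : List Int) (st : Int × Int) (i : Int) : Int × Int :=
  let b := st.1
  let a := st.2
  match PySem.List.pyGet? vec i with
  | none => st          -- IndexError; unreachable, the loop indices are in range
  | some vi =>
    let sus := vi * b + a
    let jos := b
    let g : Int := (Int.gcd sus jos : Int)
    let sus := PySem.Int.floordiv sus g
    let jos := PySem.Int.floordiv jos g
    (sus, jos)          -- b = sus, a = jos

def compute_frac (vec : List Int) : List Int :=
  match PySem.List.pyGet? vec ((vec.length : Int) - 1) with
  | none => []          -- IndexError on empty vec; excluded by Pre_
  | some b0 =>
    let st := (PySem.List.pyRange ((vec.length : Int) - 2) (-1) (-1)).foldl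
                (computeFracStep vec) (b0, 1)
    [st.1, st.2]

-- ===== PORT B =====
def compute_frac_alt (vec : List Int) : List Int :=
  match vec with
  | [] => []            -- vec[0] raises IndexError; excluded by Pre_
  | v0 :: rest =>
    let st := rest.foldl
      (fun (st : (Int × Int) × (Int × Int)) x =>
        ((st.1.2, x * st.1.2 + st.1.1), (st.2.2, x * st.2.2 + st.2.1)))
      ((1, v0), (0, 1))
    [st.1.2, st.2.2]

-- ===== PRECONDITION & SPEC =====
-- A raises IndexError on the empty list (vec[len(vec)-1]); B raises there too (vec[0]).
def Pre_compute_frac (vec : List Int) : Prop := vec ≠ []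
instance (vec : List Int) : Decidable (Pre_compute_frac vec) := by unfold Pre_compute_frac; infer_instance
def pvWitness_compute_frac : List Int := [3, 1, 4]

def Spec_compute_frac (vec : List Int) (out : List Int) : Prop := out = compute_frac_alt vec
instance (vec : List Int) (out : List Int) : Decidable (Spec_compute_frac vec out) := by unfold Spec_compute_frac; infer_instance

-- ===== CLAIM (what is proved, stated in full; the proofs are below) =====
def Claim_equal_compute_frac : Prop := ∀ (vec : List Int), Dom_compute_frac vec → Pre_compute_frac vec → Spec_compute_frac vec (compute_frac vec)

-- ===== LEMMAS AND PROOFS =====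

-- the continuant pair: bk l = (K l, K l.tail); both ports compute it
def bk : List Int → Int × Int
  | [] => (1, 0)
  | x :: xs => (x * (bk xs).1 + (bk xs).2, (bk xs).1)

theorem bk_gcd : ∀ l : List Int, Int.gcd (bk l).1 (bk l).2 = 1 := by
  intro l
  induction l with
  | nil => decide
  | cons x xs ih =>
    simp only [bk]
    rw [Int.gcd_mul_right_add_left, Int.gcd_comm]; exact ih

-- one A-step applied to the continuant pair of the tail advances it
theorem step_bk (vec xs : List Int) (i : Int)
    (h : PySem.List.pyGet? vec i = some (xs.headD 0)) (hne : xs ≠ []) :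
    computeFracStep vec (bk xs.tail) i = bk xs := by
  obtain ⟨x, t, rfl⟩ : ∃ x t, xs = x :: t := by
    cases xs with | nil => exact absurd rfl hne | cons x t => exact ⟨x, t, rfl⟩
  simp only [List.headD] at h
  have hg : Int.gcd (x * (bk t).1 + (bk t).2) (bk t).1 = 1 := by
    have := bk_gcd t
    rw [Int.gcd_mul_right_add_left, Int.gcd_comm]
    exact this
  simp only [computeFracStep, h, List.tail_cons, hg, bk]
  simp

-- A's downward index loop over vec computes bk vec
theorem aloop_bk : ∀ (pre : List Int) (xs : List Int) (hne : xs ≠ []),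
    List.foldl (computeFracStep (pre ++ xs))
      ((xs.getLast hne, 1))
      (PySem.List.pyRange ((pre.length : Int) + (xs.length : Int) - 2) ((pre.length : Int) - 1) (-1))
    = bk xs := by
  intro pre xs
  induction xs generalizing pre with
  | nil => intro h; exact absurd rfl h
  | cons x t ih =>
    intro hne
    cases t with
    | nil =>
      have : (pre.length : Int) + (1 : Int) - 2 ≤ (pre.length : Int) - 1 := by omega
      rw [show ((x :: ([] : List Int)).length : Int) = 1 by simp,
          PySem.List.pyRange_neg_one_eq_nil this]
      simp [bk, List.getLast]
    | cons y s =>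
      -- split off the last index pre.length (which reads x) from the countdown
      have hlt : ((pre.length : Int) - 1) < (pre.length : Int) + ((x :: y :: s).length : Int) - 2 + 1 := by
        simp; omega
      have hsplit : PySem.List.pyRange ((pre.length : Int) + ((x :: y :: s).length : Int) - 2) ((pre.length : Int) - 1) (-1)
          = PySem.List.pyRange ((pre.length : Int) + ((x :: y :: s).length : Int) - 2) ((pre.length : Int)) (-1) ++ [(pre.length : Int)] := by
        rw [PySem.List.pyRange_neg_one_eq_reverse, PySem.List.pyRange_neg_one_eq_reverse,
            PySem.List.pyRange_one_cons (by simp; omega)]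
        simp
      rw [hsplit, List.foldl_append]
      have hmain : List.foldl (computeFracStep (pre ++ x :: y :: s))
          (((x :: y :: s).getLast (by simp), 1))
          (PySem.List.pyRange ((pre.length : Int) + ((x :: y :: s).length : Int) - 2) ((pre.length : Int)) (-1))
          = bk (y :: s) := by
        have := ih (pre := pre ++ [x]) (by simp)
        rw [show (pre ++ [x]) ++ y :: s = pre ++ x :: y :: s by simp] at this
        rw [show (((pre ++ [x]).length : Int)) = (pre.length : Int) + 1 by simp] at this
        rw [show ((pre.length : Int) + 1 + ((y :: s).length : Int) - 2) = ((pre.length : Int) + ((x :: y :: s).length : Int) - 2) by simp; omega,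
            show ((pre.length : Int) + 1 - 1) = (pre.length : Int) by omega] at this
        simpa [List.getLast] using this
      rw [hmain, List.foldl_cons, List.foldl_nil]
      have hget : PySem.List.pyGet? (pre ++ x :: y :: s) ((pre.length : Int)) = some x := by
        rw [show ((pre.length : Int)) = ((pre.length : Nat) : Int) from rfl,
            PySem.List.pyGet?_natCast]
        simp
      have := step_bk (pre ++ x :: y :: s) (x :: y :: s) (pre.length : Int)
        (by simp [hget]) (by simp)
      simpa using this

-- B's forward fold in terms of bk of the remaining list
theorem bloop_bk : ∀ (l : List Int) (hp h kp k : Int),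
    (List.foldl
      (fun (st : (Int × Int) × (Int × Int)) x =>
        ((st.1.2, x * st.1.2 + st.1.1), (st.2.2, x * st.2.2 + st.2.1)))
      ((hp, h), (kp, k)) l).1.2 = h * (bk l).1 + hp * (bk l).2
  ∧ (List.foldl
      (fun (st : (Int × Int) × (Int × Int)) x =>
        ((st.1.2, x * st.1.2 + st.1.1), (st.2.2, x * st.2.2 + st.2.1)))
      ((hp, h), (kp, k)) l).2.2 = k * (bk l).1 + kp * (bk l).2 := by
  intro l
  induction l with
  | nil => intro hp h kp k; simp [bk]
  | cons x t ih =>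
    intro hp h kp k
    simp only [List.foldl_cons]
    obtain ⟨e1, e2⟩ := ih h (x * h + hp) k (x * k + kp)
    refine ⟨?_, ?_⟩ <;> simp only [e1, e2, bk] <;> ring

theorem alt_bk (v0 : Int) (rest : List Int) :
    compute_frac_alt (v0 :: rest) = [(bk (v0 :: rest)).1, (bk (v0 :: rest)).2] := by
  obtain ⟨e1, e2⟩ := bloop_bk rest 1 v0 0 1
  simp only [compute_frac_alt, e1, e2, bk, List.cons.injEq, and_true]
  exact ⟨by ring, by ring⟩

-- ===== VERDICT (by name: the statement is the Claim_ definition above) =====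
theorem compute_frac_spec : Claim_equal_compute_frac := by
  intro vec _ hpre
  unfold Spec_compute_frac
  obtain ⟨v0, rest, rfl⟩ : ∃ v0 rest, vec = v0 :: rest := by
    cases vec with | nil => exact absurd rfl hpre | cons a b => exact ⟨a, b, rfl⟩
  rw [alt_bk]
  unfold compute_frac
  have hlast : PySem.List.pyGet? (v0 :: rest) (((v0 :: rest).length : Int) - 1)
      = some ((v0 :: rest).getLast (by simp)) := by
    rw [show (((v0 :: rest).length : Int) - 1) = (((rest.length : Nat) : Int)) by simp,
        PySem.List.pyGet?_natCast, List.getElem?_eq_getElem (by simp),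
        List.getLast_eq_getElem]
    simp
    rfl
  rw [hlast]
  have := aloop_bk ([] : List Int) (v0 :: rest) (by simp)
  simp only [List.nil_append, List.length_nil, Nat.cast_zero] at this
  rw [show ((0 : Int) + ((v0 :: rest).length : Int) - 2) = (((v0 :: rest).length : Int) - 2) by omega,
      show ((0 : Int) - 1) = (-1 : Int) by omega] at this
  simp only [this]
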